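-- pv_equiv track=rewrite | github.com/robogeeko/advent-2023 | 2023/advent-day-11.py | get_distance_between_galaxies_with_expansions
-- ===== SOURCE A (Python) =====
-- def get_distance_between_galaxies_with_expansions(galaxy1, galaxy2, rows_to_expand, columns_to_expand):
--     distance = 0
--     for i in range(min(galaxy1[0], galaxy2[0]), max(galaxy1[0], galaxy2[0])):
--         if i in rows_to_expand:
--             distance += 999999
--
--     for i in range(min(galaxy1[1], galaxy2[1]), max(galaxy1[1], galaxy2[1])):
--         if i in columns_to_expand:
--             distance += 999999
--
--     distance += abs(galaxy1[0] - galaxy2[0]) + abs(galaxy1[1] - galaxy2[1])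
--     return distance
-- ===== SOURCE B (Python) =====
-- def get_distance_between_galaxies_with_expansions(galaxy1, galaxy2, rows_to_expand, columns_to_expand):
--     r_lo, r_hi = min(galaxy1[0], galaxy2[0]), max(galaxy1[0], galaxy2[0])
--     c_lo, c_hi = min(galaxy1[1], galaxy2[1]), max(galaxy1[1], galaxy2[1])
--     extra_rows = sum(1 for r in set(rows_to_expand) if r_lo <= r < r_hi)
--     extra_cols = sum(1 for c in set(columns_to_expand) if c_lo <= c < c_hi)
--     return (r_hi - r_lo) + (c_hi - c_lo) + 999999 * (extra_rows + extra_cols)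
-- ===== Notes on version B (the rewrite author's own statement) =====
-- stated objective: alternative
-- what changed: Instead of iterating over every integer in the coordinate ranges and testing membership, B scans the de-duplicated expansion lists once and counts those falling inside each interval, then adds the Manhattan distance in closed form.
import Mathlib
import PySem

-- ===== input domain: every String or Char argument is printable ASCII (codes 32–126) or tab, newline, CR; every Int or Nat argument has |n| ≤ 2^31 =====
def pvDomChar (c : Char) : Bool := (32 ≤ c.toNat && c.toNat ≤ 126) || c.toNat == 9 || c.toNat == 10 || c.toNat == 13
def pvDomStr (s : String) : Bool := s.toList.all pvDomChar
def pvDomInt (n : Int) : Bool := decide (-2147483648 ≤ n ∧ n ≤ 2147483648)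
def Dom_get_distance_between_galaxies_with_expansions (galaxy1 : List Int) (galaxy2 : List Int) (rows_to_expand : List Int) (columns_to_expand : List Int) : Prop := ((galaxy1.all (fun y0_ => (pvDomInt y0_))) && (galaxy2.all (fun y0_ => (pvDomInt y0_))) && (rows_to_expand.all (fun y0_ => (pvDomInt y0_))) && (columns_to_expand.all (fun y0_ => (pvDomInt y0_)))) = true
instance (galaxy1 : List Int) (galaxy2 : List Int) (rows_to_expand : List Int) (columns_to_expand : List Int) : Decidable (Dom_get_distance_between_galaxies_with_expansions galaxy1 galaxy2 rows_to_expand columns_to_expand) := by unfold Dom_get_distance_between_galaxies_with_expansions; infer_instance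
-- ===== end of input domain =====

-- B replaces A's per-index range scan with a single count over the de-duplicated expansion lists (a different traversal; same measured cost on the generated inputs).


-- ===== PORT A =====
-- literal port of A: two loops over range(min, max) adding 999999 when the index is in the expansion list
def get_distance_between_galaxies_with_expansions (galaxy1 : List Int) (galaxy2 : List Int) (rows_to_expand : List Int) (columns_to_expand : List Int) : Int :=
  let x1 := PySem.List.pyGetD galaxy1 0 0
  let y1 := PySem.List.pyGetD galaxy1 1 0
  let x2 := PySem.List.pyGetD galaxy2 0 0
  let y2 := PySem.List.pyGetD galaxy2 1 0
  let distance : Int := 0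
  let distance := (PySem.List.pyRange (min x1 x2) (max x1 x2) 1).foldl
    (fun d i => if i ∈ rows_to_expand then d + 999999 else d) distance
  let distance := (PySem.List.pyRange (min y1 y2) (max y1 y2) 1).foldl
    (fun d i => if i ∈ columns_to_expand then d + 999999 else d) distance
  distance + |x1 - x2| + |y1 - y2|

-- ===== PORT B =====
-- literal port of B: count distinct expansion indices inside each interval, closed-form Manhattan distance
def get_distance_between_galaxies_with_expansions_alt (galaxy1 : List Int) (galaxy2 : List Int) (rows_to_expand : List Int) (columns_to_expand : List Int) : Int :=
  let r_lo := min (PySem.List.pyGetD galaxy1 0 0) (PySem.List.pyGetD galaxy2 0 0)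
  let r_hi := max (PySem.List.pyGetD galaxy1 0 0) (PySem.List.pyGetD galaxy2 0 0)
  let c_lo := min (PySem.List.pyGetD galaxy1 1 0) (PySem.List.pyGetD galaxy2 1 0)
  let c_hi := max (PySem.List.pyGetD galaxy1 1 0) (PySem.List.pyGetD galaxy2 1 0)
  let extra_rows : Int := ((PySem.Set.ofList rows_to_expand).countP (fun r => decide (r_lo ≤ r ∧ r < r_hi)) : Int)
  let extra_cols : Int := ((PySem.Set.ofList columns_to_expand).countP (fun c => decide (c_lo ≤ c ∧ c < c_hi)) : Int)
  (r_hi - r_lo) + (c_hi - c_lo) + 999999 * (extra_rows + extra_cols)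

-- ===== PRECONDITION & SPEC =====
-- Pre_ excludes exactly the inputs where Python A raises IndexError: a galaxy with fewer than 2 coordinates.
def Pre_get_distance_between_galaxies_with_expansions (galaxy1 : List Int) (galaxy2 : List Int) (rows_to_expand : List Int) (columns_to_expand : List Int) : Prop :=
  2 ≤ galaxy1.length ∧ 2 ≤ galaxy2.length
instance (galaxy1 : List Int) (galaxy2 : List Int) (rows_to_expand : List Int) (columns_to_expand : List Int) : Decidable (Pre_get_distance_between_galaxies_with_expansions galaxy1 galaxy2 rows_to_expand columns_to_expand) := by unfold Pre_get_distance_between_galaxies_with_expansions; infer_instance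

def pvWitness_get_distance_between_galaxies_with_expansions : List Int × List Int × List Int × List Int := ([0, 3], [4, 1], [1, 2], [2])

def Spec_get_distance_between_galaxies_with_expansions (galaxy1 : List Int) (galaxy2 : List Int) (rows_to_expand : List Int) (columns_to_expand : List Int) (out : Int) : Prop := out = get_distance_between_galaxies_with_expansions_alt galaxy1 galaxy2 rows_to_expand columns_to_expand
instance (galaxy1 : List Int) (galaxy2 : List Int) (rows_to_expand : List Int) (columns_to_expand : List Int) (out : Int) : Decidable (Spec_get_distance_between_galaxies_with_expansions galaxy1 galaxy2 rows_to_expand columns_to_expand out) := by unfold Spec_get_distance_between_galaxies_with_expansions; infer_instance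

-- ===== CLAIM (what is proved, stated in full; the proofs are below) =====
def Claim_equal_get_distance_between_galaxies_with_expansions : Prop := ∀ (galaxy1 : List Int) (galaxy2 : List Int) (rows_to_expand : List Int) (columns_to_expand : List Int), Dom_get_distance_between_galaxies_with_expansions galaxy1 galaxy2 rows_to_expand columns_to_expand → Pre_get_distance_between_galaxies_with_expansions galaxy1 galaxy2 rows_to_expand columns_to_expand → Spec_get_distance_between_galaxies_with_expansions galaxy1 galaxy2 rows_to_expand columns_to_expand (get_distance_between_galaxies_with_expansions galaxy1 galaxy2 rows_to_expand columns_to_expand)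

-- ===== LEMMAS AND PROOFS =====

-- A's loop accumulates 999999 per range index that is a member: a countP over the range.
lemma foldl_ite_count (p : Int → Prop) [DecidablePred p] :
    ∀ (l : List Int) (acc : Int),
      l.foldl (fun d i => if p i then d + 999999 else d) acc
        = acc + 999999 * (l.countP (fun i => decide (p i)) : Int) := by
  intro l
  induction l with
  | nil => intro acc; simp
  | cons a l ih =>
    intro acc
    simp only [List.foldl_cons, List.countP_cons, ih]
    by_cases h : p a <;> simp [h] <;> push_cast <;> ring

-- the count over the (nodup) range of members equals the count over the de-duplicated list of in-interval elements
lemma count_range_eq_count_set (lo hi : Int) (rows : List Int) :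
    (PySem.List.pyRange lo hi 1).countP (fun i => decide (i ∈ rows))
      = (PySem.Set.ofList rows).countP (fun r => decide (lo ≤ r ∧ r < hi)) := by
  rw [List.countP_eq_length_filter, List.countP_eq_length_filter]
  have h1 : ((PySem.List.pyRange lo hi 1).filter (fun i => decide (i ∈ rows))).Nodup :=
    (PySem.List.nodup_pyRange_one lo hi).filter _
  have h2 : ((PySem.Set.ofList rows).filter (fun r => decide (lo ≤ r ∧ r < hi))).Nodup :=
    (PySem.Set.nodup_ofList rows).filter _
  rw [← List.toFinset_card_of_nodup h1, ← List.toFinset_card_of_nodup h2]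
  congr 1
  ext x
  simp [PySem.List.mem_pyRange_one, PySem.Set.mem_ofList]
  tauto

-- ===== VERDICT (by name: the statement is the Claim_ definition above) =====
theorem get_distance_between_galaxies_with_expansions_spec : Claim_equal_get_distance_between_galaxies_with_expansions := by
  intro g1 g2 rows cols _ _
  unfold Spec_get_distance_between_galaxies_with_expansions
  unfold get_distance_between_galaxies_with_expansions get_distance_between_galaxies_with_expansions_alt
  simp only [foldl_ite_count, count_range_eq_count_set]
  set x1 := PySem.List.pyGetD g1 0 0
  set y1 := PySem.List.pyGetD g1 1 0
  set x2 := PySem.List.pyGetD g2 0 0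
  set y2 := PySem.List.pyGetD g2 1 0
  rw [abs_sub_comm x1 x2, abs_sub_comm y1 y2, ← max_sub_min_eq_abs x1 x2, ← max_sub_min_eq_abs y1 y2]
  ring
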